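-- pv_equiv track=rewrite | github.com/posl/comment_recommendation | script/mod_gen/3_time/zh/116_C/3.py | get_min_watering_times
-- ===== SOURCE A (Python) =====
-- def get_min_watering_times(N, h):
--     left = 0
--     right = 0
--     count = 0
--     for i in range(N):
--         if h[i] == 0:
--             continue
--         if left == 0:
--             left = i + 1
--             right = i + 1
--             count += h[i]
--         else:
--             if i + 1 == right:
--                 count += h[i]
--             else:
--                 count += h[i] * (i + 1 - left)
--             right = i + 1
--     return count
-- ===== SOURCE B (Python) =====
-- def get_min_watering_times(N, h):
--     # Single BACKWARD pass: walk i = N-1 .. 0 maintaining the suffix sum and the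
--     # suffix weighted sum; each nonzero h[i] proposes the answer h[i] + weighted,
--     # and the last proposal (the leftmost nonzero) wins.
--     ans = 0
--     suffix = 0
--     weighted = 0
--     for i in range(N - 1, -1, -1):
--         weighted += suffix
--         suffix += h[i]
--         if h[i] != 0:
--             ans = h[i] + weighted
--     return ans
-- ===== Notes on version B (the rewrite author's own statement) =====
-- stated objective: alternative
-- what changed: Replaces A's forward left/right/count branch machine by a single backward pass that maintains the suffix sum and suffix weighted sum, each nonzero element proposing h[i]+weighted with the leftmost (last-seen) proposal winning.
import Mathlib
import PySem

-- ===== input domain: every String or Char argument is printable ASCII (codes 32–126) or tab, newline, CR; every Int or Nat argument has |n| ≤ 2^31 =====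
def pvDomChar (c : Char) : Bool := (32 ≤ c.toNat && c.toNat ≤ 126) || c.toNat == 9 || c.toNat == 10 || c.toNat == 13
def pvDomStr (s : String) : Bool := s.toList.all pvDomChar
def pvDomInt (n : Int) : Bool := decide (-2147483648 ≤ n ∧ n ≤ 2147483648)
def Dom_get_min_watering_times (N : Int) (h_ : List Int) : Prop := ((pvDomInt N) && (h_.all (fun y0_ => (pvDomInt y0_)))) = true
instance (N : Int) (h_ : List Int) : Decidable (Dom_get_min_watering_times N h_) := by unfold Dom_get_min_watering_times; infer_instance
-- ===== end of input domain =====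

-- B replaces A's forward left/right/count branch machine by a backward pass keeping
-- suffix-sum state (alternative traversal of the same cost).

-- ===== PORT A =====
def get_min_watering_times (N : Int) (h_ : List Int) : Int :=
  ((PySem.List.pyRange 0 N 1).foldl (fun (st : Int × Int × Int) i =>
    if PySem.List.pyGetD h_ i 0 = 0 then st
    else if st.1 = 0 then (i + 1, i + 1, st.2.2 + PySem.List.pyGetD h_ i 0)
    else if i + 1 = st.2.1 then (st.1, i + 1, st.2.2 + PySem.List.pyGetD h_ i 0)
    else (st.1, i + 1, st.2.2 + PySem.List.pyGetD h_ i 0 * (i + 1 - st.1))) (0, 0, 0)).2.2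

-- ===== PORT B =====
-- state (ans, suffix, weighted); per step: weighted += suffix; suffix += h[i];
-- if h[i] != 0 then ans = h[i] + weighted
def get_min_watering_times_alt (N : Int) (h_ : List Int) : Int :=
  ((PySem.List.pyRange (N - 1) (-1) (-1)).foldl (fun (st : Int × Int × Int) i =>
    ((if PySem.List.pyGetD h_ i 0 ≠ 0 then PySem.List.pyGetD h_ i 0 + (st.2.2 + st.2.1) else st.1),
     st.2.1 + PySem.List.pyGetD h_ i 0,
     st.2.2 + st.2.1)) (0, 0, 0)).1

-- ===== PRECONDITION & SPEC =====
-- A reads h[i] for every i in range(N), so it raises IndexError exactly when N > len(h).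
def Pre_get_min_watering_times (N : Int) (h_ : List Int) : Prop := N ≤ (h_.length : Int)
instance (N : Int) (h_ : List Int) : Decidable (Pre_get_min_watering_times N h_) := by unfold Pre_get_min_watering_times; infer_instance
def pvWitness_get_min_watering_times : Int × List Int := (3, [0, 2, 5])

def Spec_get_min_watering_times (N : Int) (h_ : List Int) (out : Int) : Prop := out = get_min_watering_times_alt N h_
instance (N : Int) (h_ : List Int) (out : Int) : Decidable (Spec_get_min_watering_times N h_ out) := by unfold Spec_get_min_watering_times; infer_instance

-- ===== CLAIM (what is proved, stated in full; the proofs are below) =====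
def Claim_equal_get_min_watering_times : Prop := ∀ (N : Int) (h_ : List Int), Dom_get_min_watering_times N h_ → Pre_get_min_watering_times N h_ → Spec_get_min_watering_times N h_ (get_min_watering_times N h_)

-- ===== LEMMAS AND PROOFS =====

-- the weighted sum Σ_t l[t] * (s + t + 1 - L)
def wsum : List Int → Int → Int → Int
  | [], _, _ => 0
  | x :: xs, s, L => x * (s + 1 - L) + wsum xs (s + 1) L

theorem wsum_shift (xs : List Int) : ∀ (s L : Int), wsum xs (s + 1) L = wsum xs s L + xs.sum := by
  induction xs with
  | nil => intro s L; simp [wsum]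
  | cons x xs ih => intro s L; simp only [wsum, List.sum_cons, ih (s + 1) L]; ring

theorem wsum_shift_both (xs : List Int) : ∀ (s L c : Int), wsum xs (s + c) (L + c) = wsum xs s L := by
  induction xs with
  | nil => intro s L c; simp [wsum]
  | cons x xs ih =>
      intro s L c
      simp only [wsum]
      rw [show s + c + 1 = (s + 1) + c by ring, ih (s + 1) L c]
      ring_nf

-- A's loop body, taking the (index, value) pair
def bodyA (st : Int × Int × Int) (p : Int × Int) : Int × Int × Int :=
  if p.2 = 0 then st
  else if st.1 = 0 then (p.1 + 1, p.1 + 1, st.2.2 + p.2)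
  else if p.1 + 1 = st.2.1 then (st.1, p.1 + 1, st.2.2 + p.2)
  else (st.1, p.1 + 1, st.2.2 + p.2 * (p.1 + 1 - st.1))

-- once left = L > 0 and right ≤ current index, A's loop just accumulates the weighted sum
theorem loopA_run (l : List Int) : ∀ (s L r c : Int), 0 < L → r ≤ s →
    ((PySem.List.enumerate l s).foldl bodyA (L, r, c)).2.2 = c + wsum l s L := by
  induction l with
  | nil => intro s L r c hL hr; simp [PySem.List.enumerate_nil, wsum]
  | cons x xs ih =>
      intro s L r c hL hr
      rw [PySem.List.enumerate_cons]
      simp only [List.foldl_cons, bodyA, wsum]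
      by_cases hx : x = 0
      · rw [if_pos hx, ih (s + 1) L r c hL (by omega), hx]
        ring
      · rw [if_neg hx, if_neg (by omega : ¬ L = 0), if_neg (by omega : ¬ s + 1 = r),
            ih (s + 1) L (s + 1) (c + x * (s + 1 - L)) hL (by omega)]
        ring

-- from the searching state, A's result is the first nonzero element plus the weighted tail sum
theorem loopA_start (l : List Int) : ∀ (s c : Int), 0 ≤ s →
    ((PySem.List.enumerate l s).foldl bodyA (0, 0, c)).2.2 =
      c + (match l.findIdx? (fun v => v != 0) with
           | none => 0
           | some t => l.getD t 0 + wsum (l.drop (t + 1)) (s + t + 1) (s + t + 1)) := by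
  induction l with
  | nil => intro s c _; simp [PySem.List.enumerate_nil, List.findIdx?_nil]
  | cons x xs ih =>
      intro s c hs
      rw [PySem.List.enumerate_cons]
      simp only [List.foldl_cons, bodyA, List.findIdx?_cons]
      by_cases hx : x = 0
      · have hxb : (x != 0) = false := by simp [hx]
        rw [if_pos hx, hxb, ih (s + 1) c (by omega)]
        cases hfi : xs.findIdx? (fun v => v != 0) with
        | none => simp
        | some t =>
            simp only [Bool.false_eq_true, if_false, Option.map_some,
              List.getD_cons_succ, List.drop_succ_cons]
            congr 2 <;> (push_cast; ring)
      · have hxb : (x != 0) = true := by simpa using hx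
        rw [if_neg hx, if_pos trivial,
          loopA_run xs (s + 1) (s + 1) (s + 1) (c + x) (by omega) (le_refl _)]
        simp [hxb]
        ring

-- B's loop body on the element only (B's body reads h[i] but is otherwise index-free)
def stepB (st : Int × Int × Int) (x : Int) : Int × Int × Int :=
  ((if x ≠ 0 then x + (st.2.2 + st.2.1) else st.1), st.2.1 + x, st.2.2 + st.2.1)

-- closed characterisation of B's backward pass (a foldr after reversing)
theorem runB_char (l : List Int) : ∀ (a s w : Int),
    l.foldr (fun x st => stepB st x) (a, s, w) =
      ((match l.findIdx? (fun v => v != 0) with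
        | none => a
        | some t => l.getD t 0 + w + ((l.length : Int) - t) * s + wsum (l.drop (t + 1)) 0 0),
       s + l.sum,
       w + (l.length : Int) * s + wsum l 0 1) := by
  induction l with
  | nil => intro a s w; simp [List.findIdx?_nil, wsum]
  | cons x xs ih =>
      intro a s w
      rw [List.foldr_cons, ih a s w]
      simp only [stepB, List.findIdx?_cons, List.sum_cons, List.length_cons, wsum]
      by_cases hx : x = 0
      · have hxb : (x != 0) = false := by simp [hx]
        rw [hxb]
        simp only [Bool.false_eq_true, if_false, if_neg (by simp [hx] : ¬ x ≠ 0)]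
        cases hfi : xs.findIdx? (fun v => v != 0) with
        | none =>
            simp only [Option.map_none]
            refine Prod.ext rfl (Prod.ext (by push_cast; ring) ?_)
            simp only []
            rw [show (0 : Int) + 1 = 0 + 1 by rfl, wsum_shift xs 0 1]
            push_cast; ring
        | some t =>
            simp only [Option.map_some, List.getD_cons_succ, List.drop_succ_cons]
            refine Prod.ext ?_ (Prod.ext (by push_cast; ring) ?_)
            · simp only []
              push_cast; ring
            · simp only []
              rw [wsum_shift xs 0 1]
              push_cast; ring
      · have hxb : (x != 0) = true := by simpa using hx
        rw [hxb]
        simp only [if_pos trivial, if_pos hx]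
        refine Prod.ext ?_ (Prod.ext (by push_cast; ring) ?_)
        · simp only [List.getD_cons_zero, List.drop_succ_cons, List.drop_zero]
          rw [show wsum xs 0 0 = wsum xs 1 1 by
                have := wsum_shift_both xs 0 0 1; simpa using this.symm,
              show wsum xs 1 1 = wsum xs 0 1 + xs.sum by
                have := wsum_shift xs 0 1; simpa using this]
          push_cast; ring
        · rw [wsum_shift xs 0 1]
          push_cast; ring

-- ===== VERDICT (by name: the statement is the Claim_ definition above) =====
theorem get_min_watering_times_spec : Claim_equal_get_min_watering_times := by
  intro N h_ _ hPre
  unfold Spec_get_min_watering_times get_min_watering_times get_min_watering_times_alt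
  unfold Pre_get_min_watering_times at hPre
  by_cases hN : N < 0
  · rw [PySem.List.pyRange_one_eq_nil (by omega),
        PySem.List.pyRange_neg_one_eq_nil (by omega)]
    simp
  · push Not at hN
    set pfx := h_.take N.toNat with hpfx
    have hlenI : (pfx.length : Int) = N := by
      simp only [hpfx, List.length_take]; omega
    -- A's side: fold over enumerate pfx 0
    have hA : (PySem.List.pyRange 0 N 1).foldl (fun (st : Int × Int × Int) i =>
        if PySem.List.pyGetD h_ i 0 = 0 then st
        else if st.1 = 0 then (i + 1, i + 1, st.2.2 + PySem.List.pyGetD h_ i 0)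
        else if i + 1 = st.2.1 then (st.1, i + 1, st.2.2 + PySem.List.pyGetD h_ i 0)
        else (st.1, i + 1, st.2.2 + PySem.List.pyGetD h_ i 0 * (i + 1 - st.1))) (0, 0, 0)
        = (PySem.List.enumerate pfx 0).foldl bodyA (0, 0, 0) := by
      rw [PySem.List.enumerate_eq_map_pyRange pfx 0]
      have hlen2 : PySem.List.len pfx = N := by simpa [PySem.List.len] using hlenI
      rw [hlen2, List.foldl_map]
      apply (PySem.List.foldl_congr_mem _ _ _ _ ?_).symm
      intro acc i hi
      have hmem := (PySem.List.mem_pyRange_one).mp hi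
      have hget : PySem.List.pyGetD pfx i 0 = PySem.List.pyGetD h_ i 0 := by
        rw [PySem.List.pyGetD_eq_getElem pfx 0 hmem.1 (by omega),
            PySem.List.pyGetD_eq_getElem h_ 0 hmem.1 (by omega)]
        exact List.getElem_take
      simp only [bodyA, hget]
    -- B's side: countdown range = reverse of the forward range; then a foldr over pfx
    have hlen2 : PySem.List.len pfx = N := by
      simpa [PySem.List.len] using hlenI
    have hB : (PySem.List.pyRange (N - 1) (-1) (-1)).foldl (fun (st : Int × Int × Int) i =>
        ((if PySem.List.pyGetD h_ i 0 ≠ 0 then PySem.List.pyGetD h_ i 0 + (st.2.2 + st.2.1) else st.1),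
         st.2.1 + PySem.List.pyGetD h_ i 0,
         st.2.2 + st.2.1)) (0, 0, 0)
        = pfx.foldr (fun x st => stepB st x) (0, 0, 0) := by
      have hrev : PySem.List.pyRange (N - 1) (-1) (-1) = (PySem.List.pyRange 0 N 1).reverse := by
        rw [PySem.List.pyRange_neg_one_eq_reverse]
        norm_num
      rw [hrev]
      show (PySem.List.pyRange 0 N 1).reverse.foldl
          (fun (st : Int × Int × Int) i => stepB st (PySem.List.pyGetD h_ i 0)) (0, 0, 0) = _
      -- indices in the range are < N ≤ len h_, so pyGetD h_ agrees with pyGetD pfx there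
      have hcongr : (PySem.List.pyRange 0 N 1).reverse.foldl
            (fun (st : Int × Int × Int) i => stepB st (PySem.List.pyGetD h_ i 0)) (0, 0, 0)
          = (PySem.List.pyRange 0 N 1).reverse.foldl
            (fun (st : Int × Int × Int) i => stepB st (PySem.List.pyGetD pfx i 0)) (0, 0, 0) := by
        apply PySem.List.foldl_congr_mem
        intro acc i hi
        have hmem := (PySem.List.mem_pyRange_one).mp (List.mem_reverse.mp hi)
        have hget : PySem.List.pyGetD h_ i 0 = PySem.List.pyGetD pfx i 0 := by
          rw [PySem.List.pyGetD_eq_getElem pfx 0 hmem.1 (by omega),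
              PySem.List.pyGetD_eq_getElem h_ 0 hmem.1 (by omega)]
          exact (List.getElem_take).symm
        rw [hget]
      rw [hcongr, List.foldl_reverse,
          show List.foldr (fun x st => stepB st (PySem.List.pyGetD pfx x 0))
              ((0 : Int), (0 : Int), (0 : Int)) (PySem.List.pyRange 0 N 1)
            = List.foldr (fun x st => stepB st x) (0, 0, 0)
                ((PySem.List.pyRange 0 N 1).map (fun i => PySem.List.pyGetD pfx i 0)) from
            by rw [List.foldr_map],
          ← hlen2, PySem.List.map_pyGetD_pyRange_zero]
    rw [hA, hB, loopA_start pfx 0 0 (le_refl _), runB_char pfx 0 0 0]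
    cases hfi : pfx.findIdx? (fun v => v != 0) with
    | none => simp
    | some t =>
        simp only []
        rw [show (0 : Int) + (t : Int) + 1 = 0 + ((t : Int) + 1) by ring]
        rw [show wsum (pfx.drop (t + 1)) (0 + ((t:Int)+1)) (0 + ((t:Int)+1)) =
              wsum (pfx.drop (t + 1)) 0 0 from wsum_shift_both _ 0 0 ((t:Int)+1)]
        ring
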